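-- pv_equiv track=rewrite | github.com/benrprince/ref-range-test-patients | patient_sort.py | recur_fun
-- ===== SOURCE A (Python) =====
-- overlap = 10080
--
-- def recur_fun(p_list, range_list):
--     if range_list:
--         new_list = []
--         range_compare = range_list[0][2]
--         for r in range_list[1:]:
--             if r[1] > range_compare or (range_compare - r[1]) < overlap:
--                 new_list.append(r)
--         # TODO: Add if statement for items that will be negative if subtracting overlap
--         p_list.append([range_list[0][0], (range_list[0][2] - overlap)])
--         return recur_fun(p_list, new_list)
--     else:
--         return p_list
-- ===== SOURCE B (Python) =====
-- overlap = 10080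
--
-- def recur_fun(p_list, range_list):
--     # Single pass: an element becomes a "head" iff its r[1] exceeds
--     # (max of [2] over all previous heads) - overlap. Mutates p_list like A.
--     maxc = None
--     for r in range_list:
--         if maxc is None or r[1] > maxc - overlap:
--             p_list.append([r[0], r[2] - overlap])
--             maxc = r[2] if maxc is None else max(maxc, r[2])
--     return p_list
-- ===== Notes on version B (the rewrite author's own statement) =====
-- stated objective: faster
-- what changed: Replaced A's recursion that re-filters the remaining tail once per kept head with a single left-to-right pass keeping the running max of kept heads' r[2] and testing each r[1] against max - overlap.
-- outside the precondition, e.g. on recur_fun([], [[0, 0, 20000], [1, 5]]): A returns [[0, 9920]], B returns [[0, 9920]]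
import Mathlib
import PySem

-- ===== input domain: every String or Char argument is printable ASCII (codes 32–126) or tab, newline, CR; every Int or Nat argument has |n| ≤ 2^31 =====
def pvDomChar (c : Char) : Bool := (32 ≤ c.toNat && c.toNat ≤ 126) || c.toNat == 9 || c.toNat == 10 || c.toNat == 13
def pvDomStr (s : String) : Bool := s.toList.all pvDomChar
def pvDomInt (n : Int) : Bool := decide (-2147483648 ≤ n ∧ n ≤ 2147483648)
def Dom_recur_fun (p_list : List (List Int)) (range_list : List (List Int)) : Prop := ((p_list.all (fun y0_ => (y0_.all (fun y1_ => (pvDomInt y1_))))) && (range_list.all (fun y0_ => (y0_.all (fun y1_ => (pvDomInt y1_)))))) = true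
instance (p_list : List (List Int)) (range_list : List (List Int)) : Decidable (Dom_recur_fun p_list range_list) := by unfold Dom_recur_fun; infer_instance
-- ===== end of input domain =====

-- B replaces A's quadratic recursion (re-filtering the tail at every head) by one linear pass
-- keeping the running max of processed heads' r[2]; return value only is proved equal — both
-- Pythons also mutate p_list in place in the same way (appending the produced rows).

-- ===== PORT A =====
-- termination helper for the A port (cited in decreasing_by): the append-if loop
-- never produces more elements than it reads.
theorem pvFoldlAppendIteLen {α β : Type} (g : β → α) (p : β → Prop) [DecidablePred p] :
    ∀ (l : List β) (acc : List α),
      (l.foldl (fun acc x => if p x then acc ++ [g x] else acc) acc).length ≤ acc.length + l.length := by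
  intro l
  induction l with
  | nil => intro acc; simp
  | cons x xs ih =>
    intro acc
    simp only [List.foldl_cons, List.length_cons]
    by_cases h : p x
    · have := ih (acc ++ [g x]); simp at this; simp [h]; omega
    · have := ih acc; simp [h]; omega

-- A's recursion: take the head, filter the tail against head[2] (the append-if loop is the
-- foldl below), append [head[0], head[2]-10080] and recurse on the filtered tail.
-- List.getD i 0 is exact for the nonnegative in-range indices Pre_ guarantees.
def recur_fun (p_list : List (List Int)) (range_list : List (List Int)) : List (List Int) :=
  match range_list with
  | [] => p_list
  | hd :: tl =>
    recur_fun (p_list ++ [[hd.getD 0 0, hd.getD 2 0 - 10080]])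
      (tl.foldl (fun acc r =>
        if r.getD 1 0 > hd.getD 2 0 ∨ hd.getD 2 0 - r.getD 1 0 < 10080 then acc ++ [r] else acc) [])
termination_by range_list.length
decreasing_by
  simp only [dite_eq_ite, List.length_cons]
  have := pvFoldlAppendIteLen (Subtype.val)
    (fun x : {x // x ∈ tl} => (x : List Int).getD 1 0 > hd.getD 2 0 ∨ hd.getD 2 0 - (x : List Int).getD 1 0 < 10080)
    tl.attach []
  simp only [List.length_attach, List.length_nil, Nat.zero_add] at this
  exact Nat.lt_succ_of_le this

-- ===== PORT B =====
-- B's single pass: maxc is the running max of already-emitted heads' r[2] (none before the first).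
def recurAltLoop (p : List (List Int)) (maxc : Option Int) (l : List (List Int)) : List (List Int) :=
  match l with
  | [] => p
  | r :: tl =>
    match maxc with
    | none => recurAltLoop (p ++ [[r.getD 0 0, r.getD 2 0 - 10080]]) (some (r.getD 2 0)) tl
    | some m =>
      if r.getD 1 0 > m - 10080 then
        recurAltLoop (p ++ [[r.getD 0 0, r.getD 2 0 - 10080]]) (some (max m (r.getD 2 0))) tl
      else
        recurAltLoop p (some m) tl

def recur_fun_alt (p_list : List (List Int)) (range_list : List (List Int)) : List (List Int) :=
  recurAltLoop p_list none range_list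

-- ===== PRECONDITION & SPEC =====
-- Pre_ excludes range_list rows shorter than 3, on which Python A raises IndexError; on a few such
-- inputs A still returns (a short row may be filtered out before it becomes the head) — see cites.
def Pre_recur_fun (p_list : List (List Int)) (range_list : List (List Int)) : Prop :=
  ∀ r ∈ range_list, 3 ≤ r.length
instance (p_list : List (List Int)) (range_list : List (List Int)) : Decidable (Pre_recur_fun p_list range_list) := by unfold Pre_recur_fun; infer_instance
def pvWitness_recur_fun : List (List Int) × List (List Int) := ([[7]], [[1, 2, 20000], [3, 4, 5]])

def Spec_recur_fun (p_list : List (List Int)) (range_list : List (List Int)) (out : List (List Int)) : Prop := out = recur_fun_alt p_list range_list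
instance (p_list : List (List Int)) (range_list : List (List Int)) (out : List (List Int)) : Decidable (Spec_recur_fun p_list range_list out) := by unfold Spec_recur_fun; infer_instance

-- ===== CLAIM (what is proved, stated in full; the proofs are below) =====
def Claim_equal_recur_fun : Prop := ∀ (p_list : List (List Int)) (range_list : List (List Int)), Dom_recur_fun p_list range_list → Pre_recur_fun p_list range_list → Spec_recur_fun p_list range_list (recur_fun p_list range_list)

-- ===== LEMMAS AND PROOFS =====

-- A's filtering condition for head value c is just `c - 10080 < r[1]`.
theorem condA_eq (c : Int) (r : List Int) :
    decide (r.getD 1 0 > c ∨ c - r.getD 1 0 < 10080) = decide (c - 10080 < r.getD 1 0) := by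
  simp only [decide_eq_decide]; omega

theorem recur_fun_cons (p : List (List Int)) (hd : List Int) (tl : List (List Int)) :
    recur_fun p (hd :: tl) =
      recur_fun (p ++ [[hd.getD 0 0, hd.getD 2 0 - 10080]])
        (tl.filter (fun r => decide (hd.getD 2 0 - 10080 < r.getD 1 0))) := by
  rw [recur_fun.eq_def]
  simp only [PySem.List.foldl_append_ite_eq_filter, List.nil_append]
  congr 1
  exact List.filter_congr (fun r _ => condA_eq (hd.getD 2 0) r)

-- The B loop with running max m computes A's recursion on the m-filtered list.
theorem loop_eq_recur (l : List (List Int)) :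
    ∀ (p : List (List Int)) (m : Int),
      recurAltLoop p (some m) l =
        recur_fun p (l.filter (fun r => decide (m - 10080 < r.getD 1 0))) := by
  induction l with
  | nil => intro p m; rw [recur_fun.eq_def]; simp [recurAltLoop]
  | cons r tl ih =>
    intro p m
    by_cases h : m - 10080 < r.getD 1 0
    · rw [List.filter_cons_of_pos (by simpa using h), recur_fun_cons]
      rw [recurAltLoop]; simp only [gt_iff_lt, if_pos h]
      rw [ih, List.filter_filter]
      congr 1
      refine List.filter_congr (fun x _ => ?_)
      rw [← Bool.decide_and]
      simp only [decide_eq_decide, max_def]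
      split_ifs <;> omega
    · rw [List.filter_cons_of_neg (by simpa using h)]
      rw [recurAltLoop]; simp only [gt_iff_lt, if_neg h]
      exact ih p m

-- ===== VERDICT (by name: the statement is the Claim_ definition above) =====
theorem recur_fun_spec : Claim_equal_recur_fun := by
  intro p_list range_list _ _
  unfold Spec_recur_fun recur_fun_alt
  match range_list with
  | [] => rw [recur_fun.eq_def]; simp [recurAltLoop]
  | hd :: tl =>
    rw [recur_fun_cons, recurAltLoop, loop_eq_recur]
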